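-- pv_equiv track=rewrite | github.com/RaghadAlbeladi1/holbertonschool-higher_level_programming | python-data_structures/8-multiple_returns.py | multiple_returns
-- ===== SOURCE A (Python) =====
-- def multiple_returns(sentence):
--     if sentence == "":
--         return (0, None)
--     else:
--         first = sentence[0]
--         length = 0
--         for i in sentence:
--             length += 1
--         return (length, first)
-- ===== SOURCE B (Python) =====
-- def multiple_returns(sentence):
--     return (len(sentence), sentence[0] if sentence else None)
-- ===== Notes on version B (the rewrite author's own statement) =====
-- stated objective: idiomatic
-- what changed: Replaces the explicit counting loop and empty-string branch with a single expression using len() and a conditional for the first character; no traversal of the string remains.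
import Mathlib
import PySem

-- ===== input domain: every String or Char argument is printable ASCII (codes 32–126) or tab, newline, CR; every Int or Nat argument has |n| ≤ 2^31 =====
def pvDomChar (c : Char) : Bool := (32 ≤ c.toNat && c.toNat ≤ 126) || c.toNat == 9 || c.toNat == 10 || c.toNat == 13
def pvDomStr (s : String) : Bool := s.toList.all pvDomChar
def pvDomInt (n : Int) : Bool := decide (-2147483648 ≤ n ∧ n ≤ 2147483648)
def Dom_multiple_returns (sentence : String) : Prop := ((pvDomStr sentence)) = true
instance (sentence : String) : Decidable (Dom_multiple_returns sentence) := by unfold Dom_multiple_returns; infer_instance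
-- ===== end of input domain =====

-- B drops A's counting loop: a single expression with len() and a conditional first character (idiomatic).

-- ===== PORT A =====
def multiple_returns (sentence : String) : Int × Option String :=
  if sentence = "" then (0, none)
  else
    -- first = sentence[0]: a one-character Python str
    let first := (PySem.Str.pyGet? sentence 0).map (fun c => String.ofList [c])
    -- length = 0; for i in sentence: length += 1
    let length := sentence.toList.foldl (fun acc _ => acc + 1) (0 : Int)
    (length, first)

-- ===== PORT B =====
def multiple_returns_alt (sentence : String) : Int × Option String :=
  ((PySem.Str.len sentence : Int),
   if sentence = "" then none
   else (PySem.Str.pyGet? sentence 0).map (fun c => String.ofList [c]))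

-- ===== PRECONDITION & SPEC =====
def Spec_multiple_returns (sentence : String) (out : Int × Option String) : Prop := out = multiple_returns_alt sentence
instance (sentence : String) (out : Int × Option String) : Decidable (Spec_multiple_returns sentence out) := by unfold Spec_multiple_returns; infer_instance

-- ===== CLAIM (what is proved, stated in full; the proofs are below) =====
def Claim_equal_multiple_returns : Prop := ∀ (sentence : String), Dom_multiple_returns sentence → Spec_multiple_returns sentence (multiple_returns sentence)

-- ===== LEMMAS AND PROOFS =====
theorem foldl_count (l : List Char) (acc : Int) :
    l.foldl (fun a _ => a + 1) acc = acc + l.length := by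
  induction l generalizing acc with
  | nil => simp
  | cons c cs ih => simp [List.foldl, ih]; omega

-- ===== VERDICT (by name: the statement is the Claim_ definition above) =====
theorem multiple_returns_spec : Claim_equal_multiple_returns := by
  intro s _
  unfold Spec_multiple_returns multiple_returns multiple_returns_alt
  by_cases h : s = ""
  · subst h; simp [PySem.Str.len]
  · simp [h, foldl_count, PySem.Str.len]
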